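-- pv_equiv track=rewrite | github.com/AskTinNguyen/ralph-cli | .agents/ralph/lib/prd-parser.py | analyze_previous_approach
-- ===== SOURCE A (Python) =====
-- def analyze_previous_approach(context: str) -> str:
--     """
--     Analyze what the previous approach tried based on failure context.
--
--     Args:
--         context: The failure context from previous run
--
--     Returns:
--         Analysis string with bullet points
--     """
--     if not context:
--         return "No previous failure context available."
--
--     lines = context.split('\n')
--     analysis = []
--
--     # Look for common patterns
--     for line in lines:
--         line_lower = line.lower()
--         if 'import' in line_lower and ('error' in line_lower or 'fail' in line_lower):
--             analysis.append("- Import statements may have issues")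
--         if 'route' in line_lower and ('not found' in line_lower or '404' in line_lower):
--             analysis.append("- Route registration may be missing")
--         if 'expect' in line_lower and 'received' in line_lower:
--             analysis.append("- Test assertions did not match expected values")
--         if 'undefined' in line_lower or 'null' in line_lower:
--             analysis.append("- Some variables or properties were undefined/null")
--         if 'type' in line_lower and 'error' in line_lower:
--             analysis.append("- Type mismatches were detected")
--
--     if not analysis:
--         analysis.append("- Review the full log for specific failure details")
--
--     return '\n'.join(list(set(analysis))[:5])  # Dedupe and limit to 5
-- ===== SOURCE B (Python) =====
-- # Rule-table decomposition: one scan of the lines per rule, messages emitted in fixed rule order.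
-- _RULES = [
--     (lambda s: 'import' in s and ('error' in s or 'fail' in s),
--      "- Import statements may have issues"),
--     (lambda s: 'route' in s and ('not found' in s or '404' in s),
--      "- Route registration may be missing"),
--     (lambda s: 'expect' in s and 'received' in s,
--      "- Test assertions did not match expected values"),
--     (lambda s: 'undefined' in s or 'null' in s,
--      "- Some variables or properties were undefined/null"),
--     (lambda s: 'type' in s and 'error' in s,
--      "- Type mismatches were detected"),
-- ]
--
--
-- def analyze_previous_approach(context: str) -> str:
--     if not context:
--         return "No previous failure context available."
--     lows = [line.lower() for line in context.split('\n')]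
--     messages = [msg for pred, msg in _RULES if any(pred(s) for s in lows)]
--     if not messages:
--         messages = ["- Review the full log for specific failure details"]
--     return '\n'.join(messages[:5])
-- ===== Notes on version B (the rewrite author's own statement) =====
-- stated objective: alternative
-- what changed: A makes one accumulating pass over the lines appending a message per matching pattern and then dedupes via set(); B is a rule table scanned once per rule (any() over the pre-lowercased lines), emitting each message at most once in fixed rule order, so no dedup pass is needed.
import Mathlib
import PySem

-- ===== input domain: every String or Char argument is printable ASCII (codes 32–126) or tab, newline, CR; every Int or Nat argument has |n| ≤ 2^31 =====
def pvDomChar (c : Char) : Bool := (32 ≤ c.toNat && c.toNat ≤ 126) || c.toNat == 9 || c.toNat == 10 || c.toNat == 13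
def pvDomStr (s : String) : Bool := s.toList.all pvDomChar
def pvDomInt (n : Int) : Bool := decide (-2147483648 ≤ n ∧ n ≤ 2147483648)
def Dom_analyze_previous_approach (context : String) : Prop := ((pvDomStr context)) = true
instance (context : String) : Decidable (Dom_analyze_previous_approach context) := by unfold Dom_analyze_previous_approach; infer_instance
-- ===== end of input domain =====

-- B replaces A's single accumulating pass + set() dedup by a fixed rule table, one any()-scan of the
-- lines per rule; equivalence is claimed on inputs where at most one rule fires (elsewhere A's output
-- order is Python's hash-dependent set order).

-- shared pattern predicates (a helper on the lowercased line; used by both ports and by Pre_)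
def pvCond1 (s : List Char) : Bool :=
  PySem.Chars.isIn "import".toList s && (PySem.Chars.isIn "error".toList s || PySem.Chars.isIn "fail".toList s)
def pvCond2 (s : List Char) : Bool :=
  PySem.Chars.isIn "route".toList s && (PySem.Chars.isIn "not found".toList s || PySem.Chars.isIn "404".toList s)
def pvCond3 (s : List Char) : Bool :=
  PySem.Chars.isIn "expect".toList s && PySem.Chars.isIn "received".toList s
def pvCond4 (s : List Char) : Bool :=
  PySem.Chars.isIn "undefined".toList s || PySem.Chars.isIn "null".toList s
def pvCond5 (s : List Char) : Bool :=
  PySem.Chars.isIn "type".toList s && PySem.Chars.isIn "error".toList s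

def pvMsg1 : String := "- Import statements may have issues"
def pvMsg2 : String := "- Route registration may be missing"
def pvMsg3 : String := "- Test assertions did not match expected values"
def pvMsg4 : String := "- Some variables or properties were undefined/null"
def pvMsg5 : String := "- Type mismatches were detected"
def pvFallback : String := "- Review the full log for specific failure details"

-- ===== PORT A =====
-- list(set(analysis)) is ported as PySem.Set.ofList (first-occurrence order); Python's hash iteration
-- order is not modelled — Pre_ keeps the set at ≤ 1 element, where every order agrees.
def analyze_previous_approach (context : String) : String :=
  if context = "" then "No previous failure context available."
  else
    let lines := PySem.Chars.splitOn context.toList "\n".toList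
    let analysis : List String := lines.foldl (fun acc line =>
      let ll := PySem.Chars.lower line
      let acc := if pvCond1 ll then acc ++ [pvMsg1] else acc
      let acc := if pvCond2 ll then acc ++ [pvMsg2] else acc
      let acc := if pvCond3 ll then acc ++ [pvMsg3] else acc
      let acc := if pvCond4 ll then acc ++ [pvMsg4] else acc
      let acc := if pvCond5 ll then acc ++ [pvMsg5] else acc
      acc) []
    let analysis := if analysis = [] then analysis ++ [pvFallback] else analysis
    PySem.Str.join "\n" (PySem.List.slice (PySem.Set.ofList analysis) none (some 5))

-- ===== PORT B =====
def pvRules : List ((List Char → Bool) × String) :=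
  [(pvCond1, pvMsg1), (pvCond2, pvMsg2), (pvCond3, pvMsg3), (pvCond4, pvMsg4), (pvCond5, pvMsg5)]

def analyze_previous_approach_alt (context : String) : String :=
  if context = "" then "No previous failure context available."
  else
    let lows := (PySem.Chars.splitOn context.toList "\n".toList).map PySem.Chars.lower
    let messages := (pvRules.filter (fun r => lows.any r.1)).map (·.2)
    let messages := if messages = [] then [pvFallback] else messages
    PySem.Str.join "\n" (PySem.List.slice messages none (some 5))

-- ===== PRECONDITION & SPEC =====
-- Pre_ excludes inputs on which two or more distinct patterns fire: there A returns the messages in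
-- Python's hash-dependent set iteration order, which is accidental and not modelled; B uses rule order.
def Pre_analyze_previous_approach (context : String) : Prop :=
  ([pvCond1, pvCond2, pvCond3, pvCond4, pvCond5].countP
    (fun p => (PySem.Chars.splitOn context.toList "\n".toList).any (fun line => p (PySem.Chars.lower line)))) ≤ 1
instance (context : String) : Decidable (Pre_analyze_previous_approach context) := by
  unfold Pre_analyze_previous_approach; infer_instance

def pvWitness_analyze_previous_approach : String := "Type Error: x\nok"

def Spec_analyze_previous_approach (context : String) (out : String) : Prop := out = analyze_previous_approach_alt context
instance (context : String) (out : String) : Decidable (Spec_analyze_previous_approach context out) := by unfold Spec_analyze_previous_approach; infer_instance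

-- ===== CLAIM (what is proved, stated in full; the proofs are below) =====
def Claim_equal_analyze_previous_approach : Prop := ∀ (context : String), Dom_analyze_previous_approach context → Pre_analyze_previous_approach context → Spec_analyze_previous_approach context (analyze_previous_approach context)

-- ===== LEMMAS AND PROOFS =====

-- proof-side helpers
def pvG (x : List Char) : List String :=
  (if pvCond1 x then [pvMsg1] else []) ++ (if pvCond2 x then [pvMsg2] else []) ++
  (if pvCond3 x then [pvMsg3] else []) ++ (if pvCond4 x then [pvMsg4] else []) ++
  (if pvCond5 x then [pvMsg5] else [])

lemma pv_ofList_replicate {α : Type} [BEq α] [LawfulBEq α] (a : α) (n : Nat) (h : 0 < n) :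
    PySem.Set.ofList (List.replicate n a) = [a] := by
  induction n with
  | zero => omega
  | succ n ih =>
    rcases Nat.eq_zero_or_pos n with h0 | hp
    · subst h0; rfl
    · rw [List.replicate_succ', PySem.Set.ofList_append_singleton, ih hp,
        PySem.Set.add_of_mem (by simp)]

lemma pv_ofList_const {α : Type} [BEq α] [LawfulBEq α] (l : List α) (a : α)
    (hne : l ≠ []) (hall : ∀ x ∈ l, x = a) :
    PySem.Set.ofList l = [a] := by
  have : l = List.replicate l.length a := List.eq_replicate_of_mem hall
  rw [this, pv_ofList_replicate]
  simpa [List.length_pos_iff] using hne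

lemma pv_fired (lows : List (List Char)) (c : List Char → Bool) (m : String)
    (hg : ∀ x ∈ lows, pvG x = if c x then [m] else [])
    (hb : lows.any c = true) :
    PySem.Set.ofList (lows.flatMap pvG) = [m] ∧ lows.flatMap pvG ≠ [] := by
  obtain ⟨x, hx, hcx⟩ := List.any_eq_true.mp hb
  have hmem : m ∈ lows.flatMap pvG := by
    refine List.mem_flatMap.mpr ⟨x, hx, ?_⟩
    rw [hg x hx, hcx]; simp
  have hne : lows.flatMap pvG ≠ [] := by
    intro h; rw [h] at hmem; exact absurd hmem (List.not_mem_nil)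
  refine ⟨pv_ofList_const _ m hne ?_, hne⟩
  intro s hs
  obtain ⟨y, hy, hsy⟩ := List.mem_flatMap.mp hs
  rw [hg y hy] at hsy
  by_cases hcy : c y = true
  · rw [hcy] at hsy; simpa using hsy
  · simp [hcy] at hsy

lemma pv_step (acc : List String) (line : List Char) :
    (let ll := PySem.Chars.lower line
     let acc := if pvCond1 ll then acc ++ [pvMsg1] else acc
     let acc := if pvCond2 ll then acc ++ [pvMsg2] else acc
     let acc := if pvCond3 ll then acc ++ [pvMsg3] else acc
     let acc := if pvCond4 ll then acc ++ [pvMsg4] else acc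
     let acc := if pvCond5 ll then acc ++ [pvMsg5] else acc
     acc) = acc ++ pvG (PySem.Chars.lower line) := by
  simp only [pvG]
  split_ifs <;> simp

lemma pv_main (lows : List (List Char))
    (h : ([pvCond1, pvCond2, pvCond3, pvCond4, pvCond5].countP (fun p => lows.any p)) ≤ 1) :
    PySem.Str.join "\n" (PySem.List.slice (PySem.Set.ofList
      (if lows.flatMap pvG = [] then lows.flatMap pvG ++ [pvFallback] else lows.flatMap pvG)) none (some 5))
    = PySem.Str.join "\n" (PySem.List.slice
      (if ((pvRules.filter (fun r => lows.any r.1)).map (·.2)) = [] then [pvFallback]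
       else ((pvRules.filter (fun r => lows.any r.1)).map (·.2))) none (some 5)) := by
  cases hb1 : lows.any pvCond1 <;> cases hb2 : lows.any pvCond2 <;>
    cases hb3 : lows.any pvCond3 <;> cases hb4 : lows.any pvCond4 <;>
    cases hb5 : lows.any pvCond5 <;>
    simp [hb1, hb2, hb3, hb4, hb5] at h
  · -- none fired
    have hL : lows.flatMap pvG = [] := by
      refine List.flatMap_eq_nil_iff.mpr (fun x hx => ?_)
      simp [pvG, List.any_eq_false.mp hb1 x hx, List.any_eq_false.mp hb2 x hx,
        List.any_eq_false.mp hb3 x hx, List.any_eq_false.mp hb4 x hx,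
        List.any_eq_false.mp hb5 x hx]
    simp [hL, pvRules, hb1, hb2, hb3, hb4, hb5]
    rfl
  · -- rule 5
    have hg : ∀ x ∈ lows, pvG x = if pvCond5 x then [pvMsg5] else [] := by
      intro x hx
      simp [pvG, List.any_eq_false.mp hb1 x hx, List.any_eq_false.mp hb2 x hx,
        List.any_eq_false.mp hb3 x hx, List.any_eq_false.mp hb4 x hx]
    obtain ⟨hset, hne⟩ := pv_fired lows _ _ hg hb5
    simp [hne, hset, pvRules, hb1, hb2, hb3, hb4, hb5]
  · -- rule 4
    have hg : ∀ x ∈ lows, pvG x = if pvCond4 x then [pvMsg4] else [] := by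
      intro x hx
      simp [pvG, List.any_eq_false.mp hb1 x hx, List.any_eq_false.mp hb2 x hx, List.any_eq_false.mp hb3 x hx, List.any_eq_false.mp hb5 x hx]
    obtain ⟨hset, hne⟩ := pv_fired lows _ _ hg hb4
    simp [hne, hset, pvRules, hb1, hb2, hb3, hb4, hb5]
  · -- rule 3
    have hg : ∀ x ∈ lows, pvG x = if pvCond3 x then [pvMsg3] else [] := by
      intro x hx
      simp [pvG, List.any_eq_false.mp hb1 x hx, List.any_eq_false.mp hb2 x hx, List.any_eq_false.mp hb4 x hx, List.any_eq_false.mp hb5 x hx]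
    obtain ⟨hset, hne⟩ := pv_fired lows _ _ hg hb3
    simp [hne, hset, pvRules, hb1, hb2, hb3, hb4, hb5]
  · -- rule 2
    have hg : ∀ x ∈ lows, pvG x = if pvCond2 x then [pvMsg2] else [] := by
      intro x hx
      simp [pvG, List.any_eq_false.mp hb1 x hx, List.any_eq_false.mp hb3 x hx, List.any_eq_false.mp hb4 x hx, List.any_eq_false.mp hb5 x hx]
    obtain ⟨hset, hne⟩ := pv_fired lows _ _ hg hb2
    simp [hne, hset, pvRules, hb1, hb2, hb3, hb4, hb5]
  · -- rule 1
    have hg : ∀ x ∈ lows, pvG x = if pvCond1 x then [pvMsg1] else [] := by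
      intro x hx
      simp [pvG, List.any_eq_false.mp hb2 x hx, List.any_eq_false.mp hb3 x hx, List.any_eq_false.mp hb4 x hx, List.any_eq_false.mp hb5 x hx]
    obtain ⟨hset, hne⟩ := pv_fired lows _ _ hg hb1
    simp [hne, hset, pvRules, hb1, hb2, hb3, hb4, hb5]


-- ===== VERDICT (by name: the statement is the Claim_ definition above) =====
theorem analyze_previous_approach_spec : Claim_equal_analyze_previous_approach := by
  intro context _hdom hpre
  unfold Spec_analyze_previous_approach
  by_cases hc : context = ""
  · simp [analyze_previous_approach, analyze_previous_approach_alt, hc]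
  · unfold analyze_previous_approach analyze_previous_approach_alt
    rw [if_neg hc, if_neg hc]
    simp only [pv_step, PySem.List.foldl_append_eq_flatMap, List.nil_append]
    rw [show (PySem.Chars.splitOn context.toList "\n".toList).flatMap
          (fun line => pvG (PySem.Chars.lower line))
        = ((PySem.Chars.splitOn context.toList "\n".toList).map PySem.Chars.lower).flatMap pvG
        from (List.flatMap_map _ _ _).symm]
    exact pv_main _ (by simpa [List.any_map, Function.comp] using hpre)
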